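-- pv_equiv track=rewrite | github.com/fhidalgor/mutagenesis_visualization | mutagenesis_visualization/main/scripts/code_utils.py | _aminoacids_snv
-- ===== SOURCE A (Python) =====
-- import itertools
--
-- def _aminoacids_snv(aa1, aa2, codontable, same_aa_SNV=True):
--     '''
--     Determine if two amino acids are snv (one base difference)
--
--     Parameters
--     -----------
--     aa1 : str
--     aa2 : str
--     codontable : dict (did not want to generate each time I run the function)
--     same_aa_SNV : boolean, default True
--         If True, it will consider the same amino acid to be SNV of itself
--
--     Returns
--     --------
--     boolean, True/False
--     '''
--     # Check if aa1 is aa2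
--     if not (same_aa_SNV) and (aa1.upper() == aa2.upper()):
--         return False
--
--     # Convert amino acids to codons
--     codons1 = codontable[aa1.upper()]
--     codons2 = codontable[aa2.upper()]
--
--     # Generate a list of combination pairs between all codons in aa1 and aa2
--     codon_combinations = list(itertools.product(codons1, codons2))
--
--     # If one pair of combinations is a SNV, then return True
--     for combination in codon_combinations:
--         if _codons_pointmutants(combination[0], combination[1]) == True:
--             return True
--     return False
--
-- def _codons_pointmutants(codon1, codon2, same_codon_SNV=False):
--     '''
--     Determine if two codons are SNV. Returns a boolean.
--     If the codon is the same, will return False.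
--     Not case sensitive.
--
--     Parameters
--     -----------
--     codon1 : str
--     codon2 : str
--     same_codon_SNV : boolean, default False
--         If True, it will consider the same codon to be SNV of itself
--
--     Returns
--     --------
--     boolean, True/False
--     '''
--
--     # Check if codons are the same
--     if same_codon_SNV and codon1.upper() == codon2.upper():
--         return True
--
--     counter_occurrences = 0
--     for index, base1 in enumerate(codon1.upper()):
--         base2 = list(codon2.upper())[index]
--         if base1 == base2:
--             counter_occurrences = counter_occurrences + 1
--     if counter_occurrences == 2:
--         return True
--     return False
-- ===== SOURCE B (Python) =====
-- def _aminoacids_snv(aa1, aa2, codontable, same_aa_SNV=True):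
--     '''
--     Determine if two amino acids are snv (one base difference).
--     Re-implementation: instead of comparing every codon pair position by
--     position, build once an inverted index (position, base) -> slots of
--     aa2's codons carrying that base there; each codon of aa1 then casts
--     votes through the index and is an SNV partner of slot j exactly when
--     slot j collects 2 votes (2 matching positions).
--     '''
--     if not same_aa_SNV and aa1.upper() == aa2.upper():
--         return False
--     codons1 = [c.upper() for c in codontable[aa1.upper()]]
--     codons2 = [c.upper() for c in codontable[aa2.upper()]]
--
--     width = 0
--     for c in codons1:
--         if len(c) > width:
--             width = len(c)
--
--     # index[i][base] = slots j with codons2[j][i] == base (built once)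
--     index = []
--     for i in range(width):
--         d = {}
--         for j, c2 in enumerate(codons2):
--             if i < len(c2):
--                 d.setdefault(c2[i], []).append(j)
--         index.append(d)
--
--     for c1 in codons1:
--         votes = [0] * len(codons2)
--         for i, base in enumerate(c1):
--             for j in index[i].get(base, []):
--                 votes[j] += 1
--         if 2 in votes:
--             return True
--     return False
-- ===== Notes on version B (the rewrite author's own statement) =====
-- stated objective: alternative
-- what changed: Replaces A's pairwise codon comparison (itertools.product plus a per-pair match-counting helper) with an inverted index (position, base) -> codon2 slots built once, through which each codon of aa1 casts votes into a tally vector; a slot collecting exactly 2 votes means 2 matching positions, so the per-pair positional scan disappears.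
-- outside the precondition, e.g. on _aminoacids_snv('A', 'B', {'A': ['AAA'], 'B': ['AAT', 'G']}, True): A returns True, B returns True
import Mathlib
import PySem

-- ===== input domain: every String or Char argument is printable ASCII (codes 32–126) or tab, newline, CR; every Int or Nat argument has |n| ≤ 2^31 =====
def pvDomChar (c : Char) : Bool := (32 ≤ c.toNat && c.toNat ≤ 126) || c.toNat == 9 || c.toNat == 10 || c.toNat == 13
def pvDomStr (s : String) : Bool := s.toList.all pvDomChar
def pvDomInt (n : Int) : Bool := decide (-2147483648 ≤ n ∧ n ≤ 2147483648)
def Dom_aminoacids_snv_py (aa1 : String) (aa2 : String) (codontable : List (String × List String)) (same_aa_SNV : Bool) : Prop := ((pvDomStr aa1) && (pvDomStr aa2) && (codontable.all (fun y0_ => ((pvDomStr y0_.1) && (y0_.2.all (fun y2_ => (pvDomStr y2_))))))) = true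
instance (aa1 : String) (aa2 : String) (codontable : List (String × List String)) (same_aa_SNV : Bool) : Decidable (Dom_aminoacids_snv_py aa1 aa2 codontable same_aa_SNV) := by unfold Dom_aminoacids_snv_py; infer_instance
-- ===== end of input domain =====

-- B replaces A's pairwise codon comparison with an inverted index (position, base) -> codon2 slots
-- built once, through which each codon of aa1 casts votes into a per-slot tally ('alternative').


-- ===== PORT A =====
-- _codons_pointmutants(codon1, codon2, same_codon_SNV=False): enumerate codon1.upper(),
-- index list(codon2.upper())[index] (pyGetD with a dummy default — exact under Pre_,
-- which keeps every index in range), count equal bases, return counter == 2.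
def codonsPointmutantsA (codon1 : String) (codon2 : String) (same_codon_SNV : Bool) : Bool :=
  if same_codon_SNV && (PySem.Str.upper codon1 == PySem.Str.upper codon2) then
    true
  else
    let counter : Int :=
      (PySem.List.enumerate (PySem.Str.upper codon1).toList 0).foldl
        (fun (c : Int) p =>
          -- base2 = list(codon2.upper())[index], inlined
          if p.2 == PySem.List.pyGetD (PySem.Str.upper codon2).toList p.1 ' ' then c + 1 else c) 0
    if counter == 2 then true else false

-- codontable[aa.upper()]: KeyError is modeled by getD [] — exact under Pre_ (both keys present).
def aminoacids_snv_py (aa1 : String) (aa2 : String) (codontable : List (String × List String)) (same_aa_SNV : Bool) : Bool :=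
  if !same_aa_SNV && (PySem.Str.upper aa1 == PySem.Str.upper aa2) then
    false
  else
    let codons1 := ((PySem.Dict.ofList codontable).get? (PySem.Str.upper aa1)).getD []
    let codons2 := ((PySem.Dict.ofList codontable).get? (PySem.Str.upper aa2)).getD []
    let codon_combinations := codons1.flatMap (fun c1 => codons2.map (fun c2 => (c1, c2)))
    codon_combinations.any (fun combination => codonsPointmutantsA combination.1 combination.2 false)

-- ===== PORT B =====
-- index[i] for one position i: for j, c2 in enumerate(codons2): if i < len(c2): d.setdefault(c2[i], []).append(j)
def posDict (codons2 : List String) (i : Nat) : PySem.Dict Char (List Int) :=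
  (PySem.List.enumerate codons2).foldl
    (fun d p =>
      if i < p.2.toList.length then
        d.modify (p.2.toList.getD i ' ') [] (fun l => l ++ [p.1])
      else d)
    PySem.Dict.empty

-- index = []; for i in range(width): … index.append(d)
def buildIdx (codons2 : List String) (width : Nat) : List (PySem.Dict Char (List Int)) :=
  (List.range width).foldl (fun acc i => acc ++ [posDict codons2 i]) []

-- for i, base in enumerate(c1): for j in index[i].get(base, []): votes[j] += 1
-- (slots j come from enumerate and are nonnegative, so j.toNat is exact; index[i] with
--  i < width is always in range, so getD with an empty-dict default is exact)
def tallyGo (idx : List (PySem.Dict Char (List Int))) : List Char → Nat → List Int → List Int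
  | [], _, votes => votes
  | b :: rest, i, votes =>
      tallyGo idx rest (i + 1)
        (((idx.getD i PySem.Dict.empty).getD b []).foldl
          (fun v j => v.modify j.toNat (· + 1)) votes)

def aminoacids_snv_py_alt (aa1 : String) (aa2 : String) (codontable : List (String × List String)) (same_aa_SNV : Bool) : Bool :=
  if !same_aa_SNV && (PySem.Str.upper aa1 == PySem.Str.upper aa2) then
    false
  else
    let codons1 := (((PySem.Dict.ofList codontable).get? (PySem.Str.upper aa1)).getD []).map PySem.Str.upper
    let codons2 := (((PySem.Dict.ofList codontable).get? (PySem.Str.upper aa2)).getD []).map PySem.Str.upper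
    -- width = 0; for c in codons1: if len(c) > width: width = len(c)
    let width := codons1.foldl (fun w c => if c.toList.length > w then c.toList.length else w) 0
    let idx := buildIdx codons2 width
    codons1.any (fun c1 =>
      (tallyGo idx c1.toList 0 (List.replicate codons2.length (0 : Int))).contains 2)

-- ===== PRECONDITION & SPEC =====
-- Pre_ excludes inputs where A raises: a missing codontable key (KeyError), and inputs where some
-- codon of aa2 is shorter than some codon of aa1 (positional indexing raises IndexError); the
-- length condition also excludes a few inputs where A still returns True because an earlier codon
-- pair already matched before the short codon is reached — B returns the same True there.
def Pre_aminoacids_snv_py (aa1 : String) (aa2 : String) (codontable : List (String × List String)) (same_aa_SNV : Bool) : Prop :=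
  (same_aa_SNV = false ∧ PySem.Str.upper aa1 = PySem.Str.upper aa2) ∨
  (((PySem.Dict.ofList codontable).get? (PySem.Str.upper aa1)).isSome = true ∧
   ((PySem.Dict.ofList codontable).get? (PySem.Str.upper aa2)).isSome = true ∧
   ∀ c1 ∈ ((PySem.Dict.ofList codontable).get? (PySem.Str.upper aa1)).getD [],
     ∀ c2 ∈ ((PySem.Dict.ofList codontable).get? (PySem.Str.upper aa2)).getD [],
       c1.length ≤ c2.length)
instance (aa1 : String) (aa2 : String) (codontable : List (String × List String)) (same_aa_SNV : Bool) : Decidable (Pre_aminoacids_snv_py aa1 aa2 codontable same_aa_SNV) := by unfold Pre_aminoacids_snv_py; infer_instance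

def pvWitness_aminoacids_snv_py : String × String × (List (String × List String)) × Bool :=
  ("a", "B", [("A", ["GCT"]), ("B", ["GAT", "GAC"])], true)

def Spec_aminoacids_snv_py (aa1 : String) (aa2 : String) (codontable : List (String × List String)) (same_aa_SNV : Bool) (out : Bool) : Prop := out = aminoacids_snv_py_alt aa1 aa2 codontable same_aa_SNV
instance (aa1 : String) (aa2 : String) (codontable : List (String × List String)) (same_aa_SNV : Bool) (out : Bool) : Decidable (Spec_aminoacids_snv_py aa1 aa2 codontable same_aa_SNV out) := by unfold Spec_aminoacids_snv_py; infer_instance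

-- ===== CLAIM (what is proved, stated in full; the proofs are below) =====
def Claim_equal_aminoacids_snv_py : Prop := ∀ (aa1 : String) (aa2 : String) (codontable : List (String × List String)) (same_aa_SNV : Bool), Dom_aminoacids_snv_py aa1 aa2 codontable same_aa_SNV → Pre_aminoacids_snv_py aa1 aa2 codontable same_aa_SNV → Spec_aminoacids_snv_py aa1 aa2 codontable same_aa_SNV (aminoacids_snv_py aa1 aa2 codontable same_aa_SNV)

-- ===== LEMMAS AND PROOFS =====

-- match count of the c1-suffix l (positions from i) against one codon, as B's votes accumulate it
def matchCnt : List Char → Nat → List Char → Int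
  | [], _, _ => 0
  | b :: rest, i, c2 =>
      (if i < c2.length ∧ c2.getD i ' ' = b then 1 else 0) + matchCnt rest (i + 1) c2

-- A's counting loop, generalized over a consumed prefix of the second codon
theorem countA_go (u1 : List Char) : ∀ (pre u2 : List Char) (acc : Int), u1.length ≤ u2.length →
    (PySem.List.enumerate u1 (pre.length : Int)).foldl
      (fun (c : Int) p => if p.2 == PySem.List.pyGetD (pre ++ u2) p.1 ' ' then c + 1 else c) acc
    = acc + ((u1.zip u2).countP (fun p => p.1 == p.2) : Nat) := by
  induction u1 with
  | nil => intro pre u2 acc _; simp [PySem.List.enumerate_nil]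
  | cons x u1' ih =>
    intro pre u2 acc hlen
    cases u2 with
    | nil => simp at hlen
    | cons y u2' =>
      have hget : PySem.List.pyGetD (pre ++ y :: u2') (pre.length : Int) ' ' = y := by
        rw [PySem.List.pyGetD_natCast]
        simp [List.getD]
      have hstep : ((pre.length : Int) + 1) = (((pre ++ [y]).length : Nat) : Int) := by
        simp
      rw [PySem.List.enumerate_cons]
      simp only [List.foldl_cons, hget, hstep]
      have happ : pre ++ y :: u2' = (pre ++ [y]) ++ u2' := by simp
      rw [happ, ih (pre ++ [y]) u2' _ (by simpa using hlen)]
      by_cases hxy : (x == y) = true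
      · simp [List.zip_cons_cons, hxy]; ring
      · simp [List.zip_cons_cons, hxy]

-- B's matchCnt from position i is the zip-count against the dropped codon
theorem matchCnt_eq_countP (l : List Char) : ∀ (i : Nat) (c2 : List Char), i + l.length ≤ c2.length →
    matchCnt l i c2 = ((l.zip (c2.drop i)).countP (fun p => p.1 == p.2) : Nat) := by
  induction l with
  | nil => intro i c2 _; simp [matchCnt]
  | cons b rest ih =>
    intro i c2 h
    have hi : i < c2.length := by simp at h; omega
    have hdrop : c2.drop i = c2[i] :: c2.drop (i + 1) := List.drop_eq_getElem_cons hi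
    have hg : c2.getD i ' ' = c2[i] := List.getD_eq_getElem c2 ' ' hi
    rw [matchCnt, ih (i + 1) c2 (by simp at h ⊢; omega), hdrop, List.zip_cons_cons,
      List.countP_cons, hg]
    by_cases hbe : (c2[i] = b)
    · simp [hbe, hi]; ring
    · have hne : ¬ (b = c2[i]) := fun hx => hbe hx.symm
      simp [hbe, hne, hi]

-- the slot list stored at (position i, base b), characterized
theorem posDict_getD (codons2 : List String) (i : Nat) (b : Char) :
    (posDict codons2 i).getD b []
      = ((PySem.List.enumerate codons2).filter
          (fun p => (p.2.toList.getD i ' ' == b) && decide (i < p.2.toList.length))).map (·.1) := by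
  unfold posDict
  rw [PySem.List.foldl_ite_eq_foldl_filter]
  rw [show (List.foldl
          (fun d p => (fun (d : PySem.Dict Char (List Int)) (q : Char × Int) => d.modify q.1 [] fun l => l ++ [q.2]) d ((fun p : Int × String => (p.2.toList.getD i ' ', p.1)) p))
          PySem.Dict.empty (List.filter (fun x => decide (i < x.2.toList.length)) (PySem.List.enumerate codons2)))
      = (List.foldl (fun (d : PySem.Dict Char (List Int)) (q : Char × Int) => d.modify q.1 [] fun l => l ++ [q.2])
          PySem.Dict.empty (((List.filter (fun x => decide (i < x.2.toList.length)) (PySem.List.enumerate codons2))).map (fun p : Int × String => (p.2.toList.getD i ' ', p.1))))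
      from (List.foldl_map (f := fun p : Int × String => (p.2.toList.getD i ' ', p.1)) (g := fun (d : PySem.Dict Char (List Int)) (q : Char × Int) => d.modify q.1 [] fun l => l ++ [q.2])).symm]
  rw [PySem.Dict.getD_foldl_modify_append]
  simp [List.filter_map, List.map_map, Function.comp_def, List.filter_filter]

theorem posDict_nonneg (codons2 : List String) (i : Nat) (b : Char) :
    ∀ j ∈ (posDict codons2 i).getD b [], 0 ≤ j := by
  intro j hj
  rw [posDict_getD] at hj
  rcases List.mem_map.mp hj with ⟨p, hp, rfl⟩
  rcases (PySem.List.mem_enumerate_iff _ _ _).mp (List.mem_filter.mp hp).1 with ⟨k, _, rfl⟩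
  simp

theorem posDict_count (codons2 : List String) (i : Nat) (b : Char) (m : Nat) :
    ((posDict codons2 i).getD b []).count ((m : Nat) : Int)
      = if i < (codons2.getD m "").toList.length ∧ (codons2.getD m "").toList.getD i ' ' = b
        then 1 else 0 := by
  rw [posDict_getD]
  have hnd : (((PySem.List.enumerate codons2).filter
        (fun p => (p.2.toList.getD i ' ' == b) && decide (i < p.2.toList.length))).map (·.1)).Nodup := by
    refine (List.Sublist.map _ List.filter_sublist).nodup ?_
    rw [PySem.List.map_fst_enumerate]
    exact PySem.List.nodup_pyRange_one _ _
  have hmem : (((m : Nat) : Int) ∈ ((PySem.List.enumerate codons2).filter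
        (fun p => (p.2.toList.getD i ' ' == b) && decide (i < p.2.toList.length))).map (·.1))
      ↔ (i < (codons2.getD m "").toList.length ∧ (codons2.getD m "").toList.getD i ' ' = b) := by
    constructor
    · intro h
      rcases List.mem_map.mp h with ⟨p, hp, hfst⟩
      rcases (PySem.List.mem_enumerate_iff _ _ _).mp (List.mem_filter.mp hp).1 with ⟨k, hk, rfl⟩
      have hkm : k = m := by simpa using hfst
      subst hkm
      have hR := (List.mem_filter.mp hp).2
      simp only [Bool.and_eq_true, beq_iff_eq, decide_eq_true_eq] at hR
      rw [List.getD_eq_getElem codons2 "" hk]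
      exact ⟨hR.2, hR.1⟩
    · rintro ⟨h1, h2⟩
      have hm : m < codons2.length := by
        by_contra hc
        rw [List.getD_eq_default codons2 "" (by omega)] at h1
        simp at h1
      refine List.mem_map.mpr ⟨((0 : Int) + (m : Nat), codons2[m]), List.mem_filter.mpr ⟨?_, ?_⟩, by simp⟩
      · exact (PySem.List.mem_enumerate_iff _ _ _).mpr ⟨m, hm, rfl⟩
      · rw [List.getD_eq_getElem codons2 "" hm] at h1 h2
        simp only [Bool.and_eq_true, beq_iff_eq, decide_eq_true_eq]
        exact ⟨h2, h1⟩
  by_cases hc : i < (codons2.getD m "").toList.length ∧ (codons2.getD m "").toList.getD i ' ' = b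
  · rw [if_pos hc]
    exact List.count_eq_one_of_mem hnd (hmem.mpr hc)
  · rw [if_neg hc]
    exact List.count_eq_zero.mpr (fun h => hc (hmem.mp h))

-- votes after one pass of increments through a slot list
theorem foldl_modify_inc (S : List Int) : ∀ (votes : List Int) (m : Nat), (∀ j ∈ S, 0 ≤ j) →
    (S.foldl (fun v j => v.modify j.toNat (· + 1)) votes)[m]?
      = votes[m]?.map (· + (S.count ((m : Nat) : Int) : Int)) := by
  induction S with
  | nil =>
    intro votes m _
    simp
  | cons j S ih =>
    intro votes m hS
    have hj : 0 ≤ j := hS j (by simp)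
    rcases Int.eq_ofNat_of_zero_le hj with ⟨n, rfl⟩
    rw [List.foldl_cons, ih _ m (fun x hx => hS x (by simp [hx])), List.getElem?_modify]
    have hcnt : ((n : Int) :: S).count ((m : Nat) : Int)
        = S.count ((m : Nat) : Int) + (if (n : Int).toNat = m then 1 else 0) := by
      rw [List.count_cons]
      by_cases h : n = m <;> simp [h]
    cases hv : votes[m]? with
    | none => simp
    | some v =>
      by_cases h : n = m <;> simp [h, hcnt] <;> omega

theorem buildIdx_getD (codons2 : List String) (width i : Nat) (hi : i < width) :
    (buildIdx codons2 width).getD i PySem.Dict.empty = posDict codons2 i := by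
  unfold buildIdx
  rw [PySem.List.foldl_append_singleton_eq_map]
  simpa using PySem.List.getD_map_range (posDict codons2) width i PySem.Dict.empty hi

theorem tallyGo_getElem (codons2 : List String) (width : Nat) (l : List Char) :
    ∀ (i : Nat) (votes : List Int) (m : Nat), i + l.length ≤ width →
    (tallyGo (buildIdx codons2 width) l i votes)[m]?
      = votes[m]?.map (· + matchCnt l i (codons2.getD m "").toList) := by
  induction l with
  | nil =>
    intro i votes m _
    simp [tallyGo, matchCnt]
  | cons b rest ih =>
    intro i votes m h
    have hi : i < width := by simp at h; omega
    rw [tallyGo, ih (i + 1) _ m (by simp at h ⊢; omega), buildIdx_getD codons2 width i hi,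
      foldl_modify_inc _ _ m (posDict_nonneg codons2 i b), posDict_count, matchCnt]
    cases votes[m]? <;> simp <;> ring

-- width is an upper bound: the running maximum only grows …
theorem width_ge_init (l : List String) : ∀ (w0 : Nat),
    w0 ≤ l.foldl (fun w c => if c.toList.length > w then c.toList.length else w) w0 := by
  induction l with
  | nil => intro w0; simp
  | cons c l ih =>
    intro w0
    refine le_trans ?_ (ih (if c.toList.length > w0 then c.toList.length else w0))
    split <;> omega

-- … and dominates every codon length it has seen
theorem len_le_width (l : List String) : ∀ (w0 : Nat), ∀ c ∈ l,
    c.toList.length ≤ l.foldl (fun w c => if c.toList.length > w then c.toList.length else w) w0 := by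
  induction l with
  | nil => intro _ c hc; simp at hc
  | cons d l ih =>
    intro w0 c hc
    rcases List.mem_cons.mp hc with rfl | hc
    · refine le_trans ?_ (width_ge_init l (if c.toList.length > w0 then c.toList.length else w0))
      split <;> omega
    · exact ih _ c hc

theorem upper_toList_length (s : String) : (PySem.Str.upper s).toList.length = s.length := by
  simp [PySem.Str.toList_upper, PySem.Chars.upper]

-- per-codon1: B's tally holds a 2 exactly when some codon2 slot matches at exactly 2 positions
theorem tally_contains_iff (codons2 : List String) (width : Nat) (c1 : List Char)
    (hw : c1.length ≤ width) :
    ((tallyGo (buildIdx codons2 width) c1 0 (List.replicate codons2.length (0 : Int))).contains 2) = true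
      ↔ ∃ m, m < codons2.length ∧ matchCnt c1 0 (codons2.getD m "").toList = 2 := by
  rw [List.contains_iff_mem, List.mem_iff_getElem?]
  constructor
  · rintro ⟨m, hm⟩
    rw [tallyGo_getElem codons2 width c1 0 _ m (by simpa using hw)] at hm
    rw [List.getElem?_replicate] at hm
    by_cases h : m < codons2.length
    · rw [if_pos h] at hm
      simp only [Option.map_some, Option.some.injEq, zero_add] at hm
      exact ⟨m, h, hm⟩
    · rw [if_neg h] at hm; simp at hm
  · rintro ⟨m, hm, hmc⟩
    refine ⟨m, ?_⟩
    rw [tallyGo_getElem codons2 width c1 0 _ m (by simpa using hw), List.getElem?_replicate,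
      if_pos hm]
    simp only [Option.map_some, zero_add, hmc]

-- A's per-pair helper decides exactly "matchCnt = 2"
theorem pairA_iff (c1 c2 : String) (hlen : c1.length ≤ c2.length) :
    codonsPointmutantsA c1 c2 false
      = decide (matchCnt (PySem.Str.upper c1).toList 0 (PySem.Str.upper c2).toList = 2) := by
  unfold codonsPointmutantsA
  set u1 := (PySem.Str.upper c1).toList with hu1
  set u2 := (PySem.Str.upper c2).toList with hu2
  have hl1 : u1.length = c1.length := upper_toList_length c1
  have hl2 : u2.length = c2.length := upper_toList_length c2
  have hA : (PySem.List.enumerate u1).foldl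
      (fun (c : Int) p => if p.2 == PySem.List.pyGetD u2 p.1 ' ' then c + 1 else c) 0
      = (0 : Int) + ((u1.zip u2).countP (fun p => p.1 == p.2) : Nat) :=
    countA_go u1 [] u2 0 (by omega)
  rw [zero_add] at hA
  rw [matchCnt_eq_countP u1 0 u2 (by omega)]
  simp only [Bool.false_and, Bool.false_eq_true, if_false, hA, List.drop_zero]
  by_cases hc : (((u1.zip u2).countP (fun p => p.1 == p.2) : Nat) : Int) = 2
  · simp [hc]
  · simp [hc]

-- ===== VERDICT (by name: the statement is the Claim_ definition above) =====
theorem aminoacids_snv_py_spec : Claim_equal_aminoacids_snv_py := by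
  intro aa1 aa2 codontable same_aa_SNV _ hpre
  unfold Spec_aminoacids_snv_py aminoacids_snv_py aminoacids_snv_py_alt
  by_cases hg : (!same_aa_SNV && (PySem.Str.upper aa1 == PySem.Str.upper aa2)) = true
  · simp [hg]
  · simp only [hg, Bool.false_eq_true, if_false]
    rcases hpre with ⟨hs, heq⟩ | ⟨_, _, hlen⟩
    · exfalso; apply hg; simp [hs, heq]
    rw [Bool.eq_iff_iff]
    simp only [List.any_map, List.any_eq_true, List.mem_flatMap, List.mem_map,
      Function.comp_apply]
    constructor
    · rintro ⟨x, ⟨c1, hm1, c2, hm2, rfl⟩, hp⟩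
      refine ⟨c1, hm1, ?_⟩
      have hwle : (PySem.Str.upper c1).toList.length
          ≤ (((((PySem.Dict.ofList codontable).get? (PySem.Str.upper aa1)).getD []).map PySem.Str.upper).foldl
              (fun w c => if c.toList.length > w then c.toList.length else w) 0) :=
        len_le_width _ 0 _ (List.mem_map.mpr ⟨c1, hm1, rfl⟩)
      rw [tally_contains_iff _ _ _ hwle]
      rcases List.mem_iff_getElem.mp hm2 with ⟨m, hm, rfl⟩
      have hgd : ((((PySem.Dict.ofList codontable).get? (PySem.Str.upper aa2)).getD []).map PySem.Str.upper).getD m ""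
          = PySem.Str.upper (((PySem.Dict.ofList codontable).get? (PySem.Str.upper aa2)).getD [])[m] := by
        rw [List.getD_eq_getElem _ _ (by simpa using hm)]
        simp
      refine ⟨m, by simpa using hm, ?_⟩
      rw [hgd]
      rw [pairA_iff c1 _ (hlen c1 hm1 _ (List.getElem_mem hm))] at hp
      exact of_decide_eq_true hp
    · rintro ⟨c1, hm1, hp⟩
      have hwle : (PySem.Str.upper c1).toList.length
          ≤ (((((PySem.Dict.ofList codontable).get? (PySem.Str.upper aa1)).getD []).map PySem.Str.upper).foldl
              (fun w c => if c.toList.length > w then c.toList.length else w) 0) :=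
        len_le_width _ 0 _ (List.mem_map.mpr ⟨c1, hm1, rfl⟩)
      rw [tally_contains_iff _ _ _ hwle] at hp
      rcases hp with ⟨m, hmlen, hmc⟩
      have hm : m < (((PySem.Dict.ofList codontable).get? (PySem.Str.upper aa2)).getD []).length := by
        simpa using hmlen
      have hgd : ((((PySem.Dict.ofList codontable).get? (PySem.Str.upper aa2)).getD []).map PySem.Str.upper).getD m ""
          = PySem.Str.upper (((PySem.Dict.ofList codontable).get? (PySem.Str.upper aa2)).getD [])[m] := by
        rw [List.getD_eq_getElem _ _ (by simpa using hm)]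
        simp
      refine ⟨(c1, (((PySem.Dict.ofList codontable).get? (PySem.Str.upper aa2)).getD [])[m]),
        ⟨c1, hm1, _, List.getElem_mem hm, rfl⟩, ?_⟩
      rw [pairA_iff c1 _ (hlen c1 hm1 _ (List.getElem_mem hm))]
      rw [hgd] at hmc
      exact decide_eq_true hmc
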